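-- pv_equiv track=rewrite | github.com/aajanki/fi-ner-eval | eval/alignment.py | label_continues_or_empty
-- ===== SOURCE A (Python) =====
-- def label_continues_or_empty(seq, previous_label):
--     """Returns True if seq continues previous_label or 'O' (that is no new
--     tags starting)."""
--
--     seq = list(seq) # copy
--
--     if previous_label.startswith('B-'):
--         continuation_label = 'I-' + previous_label[2:]
--     elif previous_label.startswith('I-'):
--         continuation_label = previous_label
--     else:
--         continuation_label = 'O'
--
--     while seq and seq[0] == continuation_label:
--         seq.pop(0)
--
--     return all(x == 'O' for x in seq)
-- ===== SOURCE B (Python) =====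
-- def label_continues_or_empty(seq, previous_label):
--     """Returns True if seq continues previous_label or 'O' (that is no new
--     tags starting)."""
--
--     seq = list(seq)
--
--     if previous_label.startswith('B-'):
--         continuation_label = 'I-' + previous_label[2:]
--     elif previous_label.startswith('I-'):
--         continuation_label = previous_label
--     else:
--         continuation_label = 'O'
--
--     k = 0 if continuation_label == 'O' else seq.count(continuation_label)
--     return seq == [continuation_label] * k + ['O'] * (len(seq) - k)
-- ===== Notes on version B (the rewrite author's own statement) =====
-- stated objective: alternative
-- what changed: Replaced the while-pop prefix strip plus all() scan with a count of the continuation label and a single list-equality test against the expected shape [cont]*k + ['O']*(len-k).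
import Mathlib
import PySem

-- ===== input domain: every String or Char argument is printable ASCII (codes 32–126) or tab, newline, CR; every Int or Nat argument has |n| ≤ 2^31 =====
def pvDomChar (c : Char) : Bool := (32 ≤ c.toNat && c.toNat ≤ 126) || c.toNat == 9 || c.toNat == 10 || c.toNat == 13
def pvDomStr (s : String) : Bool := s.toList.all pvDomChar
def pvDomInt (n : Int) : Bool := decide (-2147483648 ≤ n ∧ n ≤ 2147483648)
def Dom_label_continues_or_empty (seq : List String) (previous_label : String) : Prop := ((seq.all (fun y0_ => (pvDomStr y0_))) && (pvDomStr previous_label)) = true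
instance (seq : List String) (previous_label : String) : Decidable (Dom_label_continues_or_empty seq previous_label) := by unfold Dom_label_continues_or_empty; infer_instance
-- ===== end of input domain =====

-- B replaces A's while-pop prefix strip + all() scan with a count and one list-equality
-- against the literal expected shape [cont]*k + ['O']*(len-k) (simpler, no mutation).

-- ===== PORT A =====
-- while seq and seq[0] == continuation_label: seq.pop(0)
def pvStripA (seq : List String) (c : String) : List String :=
  match seq with
  | [] => []
  | x :: xs => if x == c then pvStripA xs c else x :: xs

def label_continues_or_empty (seq : List String) (previous_label : String) : Bool :=
  let continuation_label :=
    if PySem.Str.startswith previous_label "B-" then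
      "I-" ++ PySem.Str.slice previous_label (some 2) none
    else if PySem.Str.startswith previous_label "I-" then
      previous_label
    else
      "O"
  (pvStripA seq continuation_label).all (fun x => x == "O")

-- ===== PORT B =====
def label_continues_or_empty_alt (seq : List String) (previous_label : String) : Bool :=
  let continuation_label :=
    if PySem.Str.startswith previous_label "B-" then
      "I-" ++ PySem.Str.slice previous_label (some 2) none
    else if PySem.Str.startswith previous_label "I-" then
      previous_label
    else
      "O"
  let k := if continuation_label == "O" then 0 else PySem.List.count seq continuation_label
  seq == List.replicate k continuation_label ++ List.replicate (seq.length - k) "O"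

-- ===== PRECONDITION & SPEC =====
def Spec_label_continues_or_empty (seq : List String) (previous_label : String) (out : Bool) : Prop := out = label_continues_or_empty_alt seq previous_label
instance (seq : List String) (previous_label : String) (out : Bool) : Decidable (Spec_label_continues_or_empty seq previous_label out) := by unfold Spec_label_continues_or_empty; infer_instance

-- ===== CLAIM (what is proved, stated in full; the proofs are below) =====
def Claim_equal_label_continues_or_empty : Prop := ∀ (seq : List String) (previous_label : String), Dom_label_continues_or_empty seq previous_label → Spec_label_continues_or_empty seq previous_label (label_continues_or_empty seq previous_label)

-- ===== LEMMAS AND PROOFS =====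

-- stripping "O" then checking all-"O" is just checking all-"O"
theorem pvStripA_O_all (seq : List String) :
    (pvStripA seq "O").all (fun x => x == "O") = seq.all (fun x => x == "O") := by
  induction seq with
  | nil => rfl
  | cons x xs ih =>
    by_cases hx : x = "O"
    · simp [pvStripA, hx, ih]
    · simp [pvStripA, hx]

-- all-"O" iff equal to replicate length "O"
theorem all_O_iff_replicate (seq : List String) :
    seq.all (fun x => x == "O") = (seq == List.replicate seq.length "O") := by
  rw [Bool.eq_iff_iff]
  simp [List.eq_replicate_iff]

-- if c appears in seq and c ≠ "O" then not all-"O"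
theorem count_pos_not_all (seq : List String) (c : String) (hc : c ≠ "O")
    (h : 0 < PySem.List.count seq c) : seq.all (fun x => x == "O") = false := by
  have hm : c ∈ seq := List.count_pos_iff.mp (by simpa [PySem.List.count_eq] using h)
  simp only [List.all_eq_false]
  exact ⟨c, hm, by simp [hc]⟩

-- main bridge for c ≠ "O"
theorem strip_eq_shape (seq : List String) (c : String) (hc : c ≠ "O") :
    (pvStripA seq c).all (fun x => x == "O")
      = (seq == List.replicate (PySem.List.count seq c) c
              ++ List.replicate (seq.length - PySem.List.count seq c) "O") := by
  induction seq with
  | nil => rfl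
  | cons x xs ih =>
    by_cases hx : x = c
    · subst hx
      have hcount : PySem.List.count (x :: xs) x = PySem.List.count xs x + 1 := by
        simp [PySem.List.count_eq]
      rw [hcount]
      have hlen : (x :: xs).length - (PySem.List.count xs x + 1)
          = xs.length - PySem.List.count xs x := by simp
      rw [hlen]
      simpa [pvStripA, List.replicate_succ] using ih
    · have hcount : PySem.List.count (x :: xs) c = PySem.List.count xs c := by
        simp [PySem.List.count_eq, hx]
      rw [hcount]
      have hstrip : pvStripA (x :: xs) c = x :: xs := by
        simp [pvStripA, hx]
      by_cases hk : PySem.List.count xs c = 0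
      · rw [hk]
        simp only [Nat.sub_zero, List.replicate_zero, List.nil_append]
        rw [hstrip, all_O_iff_replicate]
      · have hpos : 0 < PySem.List.count (x :: xs) c := by
          rw [hcount]; exact Nat.pos_of_ne_zero hk
        rw [hstrip, count_pos_not_all (x :: xs) c hc hpos]
        symm
        rw [beq_eq_false_iff_ne]
        intro heq
        apply hx
        have hhead : (List.replicate (PySem.List.count xs c) c
            ++ List.replicate ((x :: xs).length - PySem.List.count xs c) "O").head? = some c := by
          cases hcnt : PySem.List.count xs c with
          | zero => exact absurd hcnt hk
          | succ n => simp [List.replicate_succ]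
        rw [← heq] at hhead
        simpa using hhead

-- the two ports agree for every continuation label c
theorem pvBridge (seq : List String) (c : String) :
    (pvStripA seq c).all (fun x => x == "O")
      = (seq == List.replicate (if c == "O" then 0 else PySem.List.count seq c) c
              ++ List.replicate
                  (seq.length - (if c == "O" then 0 else PySem.List.count seq c)) "O") := by
  by_cases hO : c = "O"
  · subst hO
    simp only [beq_self_eq_true, if_true, List.replicate_zero, List.nil_append, Nat.sub_zero]
    rw [pvStripA_O_all, all_O_iff_replicate]
  · rw [if_neg (by simp [hO])]
    exact strip_eq_shape seq c hO

-- ===== VERDICT (by name: the statement is the Claim_ definition above) =====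
theorem label_continues_or_empty_spec : Claim_equal_label_continues_or_empty := by
  intro seq previous_label _
  unfold Spec_label_continues_or_empty label_continues_or_empty label_continues_or_empty_alt
  exact pvBridge seq _
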